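-- pv_equiv track=rewrite | github.com/djccnt15/maths | linalg.py | mat_tri_l
-- ===== SOURCE A (Python) =====
-- def mat_tri_l(a):
--     n = len(a)
--     m = len(a[0])
--     res = []
--
--     for i in range(n):
--         row = []
--         for j in range(m):
--             if i < j:
--                 row.append(0)
--             else:
--                 row.append(a[i][j])
--         res.append(row)
--
--     return res
-- ===== SOURCE B (Python) =====
-- def mat_tri_l(a):
--     m = len(a[0])
--     return [(row[:i + 1] + [0] * m)[:m] for i, row in enumerate(a)]
-- ===== Notes on version B (the rewrite author's own statement) =====
-- stated objective: simpler
-- what changed: Builds each row in one comprehension by slicing the kept prefix row[:i+1], padding with zeros and truncating to width m, instead of an inner column loop with an i<j branch appending element by element.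
import Mathlib
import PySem

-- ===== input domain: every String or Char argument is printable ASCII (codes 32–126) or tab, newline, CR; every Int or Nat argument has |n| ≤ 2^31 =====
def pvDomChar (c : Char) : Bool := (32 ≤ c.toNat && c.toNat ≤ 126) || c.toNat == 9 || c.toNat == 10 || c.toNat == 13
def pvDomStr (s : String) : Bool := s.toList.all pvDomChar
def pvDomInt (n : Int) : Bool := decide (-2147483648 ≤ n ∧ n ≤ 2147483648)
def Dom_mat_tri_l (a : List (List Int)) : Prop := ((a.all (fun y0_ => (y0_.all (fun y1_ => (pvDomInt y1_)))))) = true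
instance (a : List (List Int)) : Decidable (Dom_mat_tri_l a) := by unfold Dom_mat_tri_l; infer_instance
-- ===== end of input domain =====

-- B builds each row by slicing the kept prefix, zero-padding and truncating to width m in
-- one comprehension, instead of A's inner column loop with an i<j branch; same cost, simpler.

-- ===== PORT A =====
-- a[0] raises IndexError on empty a; Pre_ excludes that, so the .getD [] is never taken.
def mat_tri_l (a : List (List Int)) : List (List Int) :=
  let n : Int := PySem.List.len a
  let m : Int := PySem.List.len ((PySem.List.pyGet? a 0).getD [])
  (PySem.List.pyRange 0 n 1).foldl (fun res i =>
    res ++ [(PySem.List.pyRange 0 m 1).foldl (fun row j =>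
      row ++ [if i < j then 0 else PySem.List.pyGetD (PySem.List.pyGetD a i []) j 0]) []]) []

-- ===== PORT B =====
-- [0] * m is List.replicate m.toNat 0 (m = len(a[0]) ≥ 0, so toNat is exact here)
def mat_tri_l_alt (a : List (List Int)) : List (List Int) :=
  let m : Int := PySem.List.len ((PySem.List.pyGet? a 0).getD [])
  (PySem.List.enumerate a 0).map (fun p =>
    PySem.List.slice (PySem.List.slice p.2 none (some (p.1 + 1)) ++ List.replicate m.toNat 0)
      none (some m))

-- ===== PRECONDITION & SPEC =====
-- Pre_ excludes exactly the inputs on which A raises IndexError: the empty list (a[0])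
-- and ragged inputs with a row k shorter than the prefix min(k+1, m) that A reads from it.
def Pre_mat_tri_l (a : List (List Int)) : Prop :=
  a ≠ [] ∧ ∀ k < a.length, min (k + 1) a.headI.length ≤ (a.getD k []).length
instance (a : List (List Int)) : Decidable (Pre_mat_tri_l a) := by unfold Pre_mat_tri_l; infer_instance
def pvWitness_mat_tri_l : List (List Int) := [[1, 2], [3, 4]]
def Spec_mat_tri_l (a : List (List Int)) (out : List (List Int)) : Prop := out = mat_tri_l_alt a
instance (a : List (List Int)) (out : List (List Int)) : Decidable (Spec_mat_tri_l a out) := by unfold Spec_mat_tri_l; infer_instance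

-- ===== CLAIM (what is proved, stated in full; the proofs are below) =====
def Claim_equal_mat_tri_l : Prop := ∀ (a : List (List Int)), Dom_mat_tri_l a → Pre_mat_tri_l a → Spec_mat_tri_l a (mat_tri_l a)

-- ===== LEMMAS AND PROOFS =====

-- one row: A's conditional comprehension over columns equals B's pad-and-truncate,
-- given that the row is long enough for every index A actually reads
lemma row_eq (r : List Int) (m k : Nat) (hr : min (k + 1) m ≤ r.length) :
    (PySem.List.pyRange 0 (m : Int) 1).map
        (fun j => if (k : Int) < j then 0 else PySem.List.pyGetD r j 0)
      = (r.take (k + 1) ++ List.replicate m 0).take m := by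
  apply List.ext_getElem
  · simp [PySem.List.length_pyRange_one, List.length_take]
  · intro j hj1 hj2
    have hjm : j < m := by
      simpa [PySem.List.length_pyRange_one] using hj1
    simp only [List.getElem_map, PySem.List.getElem_pyRange_one, zero_add,
      List.getElem_take]
    by_cases hk : j ≤ k
    · have hjr : j < r.length := by omega
      rw [if_neg (by exact_mod_cast Nat.not_lt.mpr hk)]
      rw [List.getElem_append_left (by simp [List.length_take]; omega)]
      simp [PySem.List.pyGetD_natCast, List.getElem_take,
        List.getD_eq_getElem?_getD, List.getElem?_eq_getElem hjr]
    · rw [if_pos (by exact_mod_cast Nat.lt_of_not_le hk)]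
      rw [List.getElem_append_right (by simp [List.length_take]; omega)]
      simp

-- ===== VERDICT (by name: the statement is the Claim_ definition above) =====
theorem mat_tri_l_spec : Claim_equal_mat_tri_l := by
  intro a _ hpre
  obtain ⟨hne, hlong⟩ := hpre
  unfold Spec_mat_tri_l mat_tri_l mat_tri_l_alt
  simp only [PySem.List.len_eq, PySem.List.pyGet?_zero,
    PySem.List.foldl_append_singleton_eq_map, List.nil_append]
  apply List.ext_getElem
  · simp [PySem.List.length_pyRange_one, PySem.List.length_enumerate]
  · intro k hk1 hk2
    have hka : k < a.length := by
      simpa [PySem.List.length_pyRange_one] using hk1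
    simp only [List.getElem_map, PySem.List.getElem_pyRange_one,
      PySem.List.getElem_enumerate, zero_add]
    have h0 : a.headI.length = (a[0]?.getD []).length := by
      cases a with
      | nil => simp at hne
      | cons r0 as => simp
    have hrow : min (k + 1) (a[0]?.getD []).length ≤ a[k].length := by
      rw [← h0]
      have := hlong k hka
      simpa [List.getD_eq_getElem?_getD, List.getElem?_eq_getElem hka] using this
    have hget : PySem.List.pyGetD a ((k : Int)) [] = a[k] := by
      simp [PySem.List.pyGetD_natCast, List.getD_eq_getElem?_getD,
        List.getElem?_eq_getElem hka]
    rw [hget]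
    have hslice : PySem.List.slice a[k] none (some ((k : Int) + 1))
        = a[k].take (k + 1) := by
      rw [show ((k : Int) + 1) = ((k + 1 : Nat) : Int) by push_cast; ring,
          PySem.List.slice_to_natCast]
    rw [hslice]
    have houter : PySem.List.slice (a[k].take (k + 1)
          ++ List.replicate ((a[0]?.getD []).length : Int).toNat 0)
          none (some ((a[0]?.getD []).length : Int))
        = (a[k].take (k + 1) ++ List.replicate (a[0]?.getD []).length 0).take
            (a[0]?.getD []).length := by
      rw [show (((a[0]?.getD []).length : Int)).toNat = (a[0]?.getD []).length by omega,
          PySem.List.slice_to_natCast]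
    rw [houter]
    exact row_eq a[k] (a[0]?.getD []).length k hrow
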